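-- pv_equiv track=rewrite | github.com/kkkreddiii/HackerEarth_BasicProgram | BasicProgramming/Favourite_Singer.py | count_favorite_songs
-- ===== SOURCE A (Python) =====
-- def count_favorite_songs(playlist, songs):
--     songs_count = {}
--     for song in songs:
--         if song in songs_count:
--             songs_count[song] += 1
--         else:
--             songs_count[song] = 1
--
--     # Find the maximum count of songs by any singer
--     max_songs = max(songs_count.values())
--
--     # Count how many singers have songs equal to max_songs
--     favorite_song_count = sum(1 for count in songs_count.values() if count == max_songs)
--
--     return favorite_song_count
-- ===== SOURCE B (Python) =====
-- def count_favorite_songs(playlist, songs):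
--     # Sort the songs, then scan the sorted list run by run: each run length is
--     # one singer's song count.  max([]) raises ValueError exactly as A does.
--     counts = []
--     rest = sorted(songs)
--     while rest:
--         head, tail = rest[0], rest[1:]
--         run = 0
--         while run < len(tail) and tail[run] == head:
--             run += 1
--         counts.append(run + 1)
--         rest = tail[run:]
--     best = max(counts)
--     return sum(1 for c in counts if c == best)
-- ===== Notes on version B (the rewrite author's own statement) =====
-- stated objective: alternative
-- what changed: Replaces the hash-table (dict) counting pass with sort-then-scan: sort the songs and read each singer's count off as a run length in the sorted list, then take max and count ties over the run lengths.
import Mathlib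
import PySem

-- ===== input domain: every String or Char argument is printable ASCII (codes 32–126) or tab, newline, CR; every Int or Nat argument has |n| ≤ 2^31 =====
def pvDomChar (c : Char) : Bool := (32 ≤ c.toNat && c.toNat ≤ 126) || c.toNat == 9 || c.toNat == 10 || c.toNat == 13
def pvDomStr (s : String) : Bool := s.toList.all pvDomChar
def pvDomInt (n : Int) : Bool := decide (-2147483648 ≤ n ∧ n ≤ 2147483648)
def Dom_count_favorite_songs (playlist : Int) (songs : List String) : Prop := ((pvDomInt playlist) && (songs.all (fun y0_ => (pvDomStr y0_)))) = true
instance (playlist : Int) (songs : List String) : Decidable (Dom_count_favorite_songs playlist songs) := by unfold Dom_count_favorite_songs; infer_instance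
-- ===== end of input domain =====

-- B replaces A's dict-counting pass by sort-then-scan over run lengths; equal return
-- value proved on all nonempty song lists (both raise ValueError on []).

-- ===== PORT A =====
def count_favorite_songs (playlist : Int) (songs : List String) : Int :=
  let songs_count :=
    songs.foldl
      (fun d song =>
        if d.contains song then d.insert song (d.getD song 0 + 1)
        else d.insert song 1)
      (PySem.Dict.empty : PySem.Dict String Int)
  match PySem.List.max? songs_count.values (fun v => v) with
  | none => 0  -- Python raises ValueError here (songs = []); excluded by Pre_
  | some max_songs =>
      ((songs_count.values.filter (fun c => c == max_songs)).map (fun _ => (1 : Int))).sum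

-- ===== PORT B =====
-- the outer while loop of Source B: 'run' is the inner while (length of the leading
-- block of copies of head in tail) and 'tail[run:]' is tail.drop run
def pvRunLengths (l : List String) : List Int :=
  match l with
  | [] => []
  | head :: tail =>
      let run := (tail.takeWhile (fun s => s == head)).length
      ((run : Int) + 1) :: pvRunLengths (tail.drop run)
termination_by l.length
decreasing_by simp

def count_favorite_songs_alt (playlist : Int) (songs : List String) : Int :=
  let counts := pvRunLengths (PySem.List.sorted songs (fun s => s) false)
  match PySem.List.max? counts (fun v => v) with
  | none => 0  -- Python raises ValueError here (songs = []); excluded by Pre_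
  | some best =>
      ((counts.filter (fun c => c == best)).map (fun _ => (1 : Int))).sum

-- ===== PRECONDITION & SPEC =====
-- Pre_ excludes only songs = [], on which Python A raises ValueError (max of empty sequence)
def Pre_count_favorite_songs (playlist : Int) (songs : List String) : Prop := songs ≠ []
instance (playlist : Int) (songs : List String) : Decidable (Pre_count_favorite_songs playlist songs) := by unfold Pre_count_favorite_songs; infer_instance

def pvWitness_count_favorite_songs : Int × List String := (3, ["a", "b", "a"])

def Spec_count_favorite_songs (playlist : Int) (songs : List String) (out : Int) : Prop := out = count_favorite_songs_alt playlist songs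
instance (playlist : Int) (songs : List String) (out : Int) : Decidable (Spec_count_favorite_songs playlist songs out) := by unfold Spec_count_favorite_songs; infer_instance

-- ===== CLAIM (what is proved, stated in full; the proofs are below) =====
def Claim_equal_count_favorite_songs : Prop := ∀ (playlist : Int) (songs : List String), Dom_count_favorite_songs playlist songs → Pre_count_favorite_songs playlist songs → Spec_count_favorite_songs playlist songs (count_favorite_songs playlist songs)

-- ===== LEMMAS AND PROOFS =====

-- the heads of the runs pvRunLengths measures (proof-side mirror of pvRunLengths)
def pvHeads (l : List String) : List String :=
  match l with
  | [] => []
  | head :: tail =>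
      let run := (tail.takeWhile (fun s => s == head)).length
      head :: pvHeads (tail.drop run)
termination_by l.length
decreasing_by simp

lemma pvDrop_eq_dropWhile (p : String → Bool) (tail : List String) :
    tail.drop (tail.takeWhile p).length = tail.dropWhile p := by
  induction tail with
  | nil => rfl
  | cons y t ih =>
      by_cases hy : p y = true
      · simp [hy, ih]
      · simp [hy]

-- decomposition of a sorted cons cell around the leading run of its head
lemma pvSortedCons (x : String) (tail : List String) (h : (x :: tail).Pairwise (· ≤ ·)) :
    (∀ y ∈ tail.takeWhile (fun s => s == x), y = x) ∧
    x ∉ tail.dropWhile (fun s => s == x) ∧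
    (tail.dropWhile (fun s => s == x)).Pairwise (· ≤ ·) := by
  rcases List.pairwise_cons.1 h with ⟨hx, htail⟩
  have hrest : (tail.dropWhile (fun s => s == x)).Pairwise (· ≤ ·) :=
    htail.sublist (List.dropWhile_sublist _)
  refine ⟨fun y hy => by simpa using List.mem_takeWhile_imp hy, ?_, hrest⟩
  intro hmem
  cases hD : tail.dropWhile (fun s => s == x) with
  | nil => simp [hD] at hmem
  | cons z zs =>
      rw [hD] at hmem hrest
      have hzx : z ≠ x := by
        have h0 : 0 < (tail.dropWhile (fun s => s == x)).length := by simp [hD]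
        have hz := List.dropWhile_get_zero_not (fun s => s == x) tail h0
        simp only [List.get_eq_getElem, hD, List.getElem_cons_zero] at hz
        simpa using hz
      have hxz : x ≤ z := hx z ((List.dropWhile_sublist _).mem (by rw [hD]; exact List.mem_cons_self))
      rcases List.mem_cons.1 hmem with hcase | h2
      · exact hzx hcase.symm
      · exact hzx (le_antisymm ((List.pairwise_cons.1 hrest).1 x h2) hxz)

lemma pvHeads_mem (l : List String) (h : l.Pairwise (· ≤ ·)) (k : String) :
    k ∈ pvHeads l ↔ k ∈ l := by
  induction l using pvHeads.induct with
  | case1 => simp [pvHeads]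
  | case2 x tail run ih =>
      subst run
      rcases pvSortedCons x tail h with ⟨htake, -, hrest⟩
      rw [pvDrop_eq_dropWhile] at ih
      simp only [pvHeads, pvDrop_eq_dropWhile, List.mem_cons, ih hrest]
      constructor
      · rintro (rfl | hk)
        · exact Or.inl rfl
        · exact Or.inr ((List.dropWhile_sublist _).mem hk)
      · rintro (rfl | hk)
        · exact Or.inl rfl
        · rw [← List.takeWhile_append_dropWhile (p := fun s => s == x) (l := tail)] at hk
          rcases List.mem_append.1 hk with hk | hk
          · exact Or.inl (htake _ hk)
          · exact Or.inr hk

lemma pvHeads_nodup (l : List String) (h : l.Pairwise (· ≤ ·)) :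
    (pvHeads l).Nodup := by
  induction l using pvHeads.induct with
  | case1 => simp [pvHeads]
  | case2 x tail run ih =>
      subst run
      rcases pvSortedCons x tail h with ⟨-, hxrest, hrest⟩
      rw [pvDrop_eq_dropWhile] at ih
      simp only [pvHeads, pvDrop_eq_dropWhile, List.nodup_cons]
      exact ⟨fun hc => hxrest ((pvHeads_mem _ hrest x).1 hc), ih hrest⟩

lemma pvRunLengths_eq (l : List String) (h : l.Pairwise (· ≤ ·)) :
    pvRunLengths l = (pvHeads l).map (fun k => (l.count k : Int)) := by
  induction l using pvRunLengths.induct with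
  | case1 => simp [pvRunLengths, pvHeads]
  | case2 x tail run ih =>
      subst run
      rcases pvSortedCons x tail h with ⟨htake, hxrest, hrest⟩
      rw [pvDrop_eq_dropWhile] at ih
      simp only [pvRunLengths, pvHeads, pvDrop_eq_dropWhile, List.map_cons, List.cons.injEq]
      have hdecomp : x :: tail = x :: (tail.takeWhile (fun s => s == x) ++ tail.dropWhile (fun s => s == x)) := by
        rw [List.takeWhile_append_dropWhile]
      constructor
      · -- head entry: run + 1 = count of x
        rw [hdecomp, List.count_cons_self, List.count_append]
        have h1 : (tail.takeWhile (fun s => s == x)).count x = (tail.takeWhile (fun s => s == x)).length := by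
          apply List.count_eq_length.2
          intro b hb; exact ((htake b hb).symm ▸ rfl)
        have h2 : (tail.dropWhile (fun s => s == x)).count x = 0 :=
          List.count_eq_zero.2 hxrest
        rw [h1, h2]
        push_cast; ring
      · -- tail entries: counts in l equal counts in the rest
        rw [ih hrest]
        apply List.map_congr_left
        intro k hk
        have hkrest : k ∈ tail.dropWhile (fun s => s == x) := (pvHeads_mem _ hrest k).1 hk
        have hkx : k ≠ x := fun hkx => hxrest (hkx ▸ hkrest)
        have h1 : (tail.takeWhile (fun s => s == x)).count k = 0 :=
          List.count_eq_zero.2 (fun hkc => hkx (htake _ hkc))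
        have htail : List.count k tail = List.count k (tail.dropWhile (fun s => s == x)) := by
          conv_lhs => rw [← List.takeWhile_append_dropWhile (p := fun s => s == x) (l := tail)]
          rw [List.count_append, h1, Nat.zero_add]
        simp [htail, Ne.symm hkx]

lemma pvMax?_perm (l1 l2 : List Int) (h : l1.Perm l2) :
    PySem.List.max? l1 (fun v => v) = PySem.List.max? l2 (fun v => v) := by
  cases h1 : PySem.List.max? l1 (fun v => v) with
  | none =>
      have e1 : l1 = [] := (PySem.List.max?_eq_none_iff _ _).1 h1
      subst e1
      have e2 : l2 = [] := h.nil_eq.symm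
      subst e2
      rfl
  | some m1 =>
      cases h2 : PySem.List.max? l2 (fun v => v) with
      | none =>
          have e2 : l2 = [] := (PySem.List.max?_eq_none_iff _ _).1 h2
          subst e2
          have e1 : l1 = [] := h.eq_nil
          rw [e1] at h1
          simp [PySem.List.max?] at h1
      | some m2 =>
          have hm1 := PySem.List.max?_mem h1
          have hm2 := PySem.List.max?_mem h2
          have hle1 : m2 ≤ m1 := PySem.List.max?_isMax h1 m2 (h.mem_iff.2 hm2)
          have hle2 : m1 ≤ m2 := PySem.List.max?_isMax h2 m1 (h.mem_iff.1 hm1)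
          rw [le_antisymm hle1 hle2]

lemma pvCountSum (l : List Int) (m : Int) :
    ((l.filter (fun c => c == m)).map (fun _ => (1 : Int))).sum = (l.count m : Int) := by
  simp [← List.countP_eq_length_filter, List.count]

-- ===== VERDICT (by name: the statement is the Claim_ definition above) =====
theorem count_favorite_songs_spec : Claim_equal_count_favorite_songs := by
  intro playlist songs _ _
  unfold Spec_count_favorite_songs count_favorite_songs count_favorite_songs_alt
  have hfg : ∀ (d : PySem.Dict String Int) (x : String), x ∈ songs →
      (if d.contains x = true then d.insert x (d.getD x 0 + 1) else d.insert x 1)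
        = d.insert x (d.getD x 0 + 1) := by
    intro d x _
    by_cases hc : d.contains x = true
    · rw [if_pos hc]
    · have h0 : d.getD x 0 = 0 := PySem.Dict.getD_of_not_contains d 0 (by simpa using hc)
      rw [if_neg hc, h0]
      norm_num
  have hstep : songs.foldl
      (fun d song =>
        if d.contains song = true then d.insert song (d.getD song 0 + 1)
        else d.insert song 1) (PySem.Dict.empty : PySem.Dict String Int) = PySem.Dict.counter songs :=
    Eq.trans
      (PySem.List.foldl_congr_mem songs
        (fun (d : PySem.Dict String Int) song =>
          if d.contains song = true then d.insert song (d.getD song 0 + 1)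
          else d.insert song 1)
        (fun d x => d.insert x (d.getD x 0 + 1)) (PySem.Dict.empty : PySem.Dict String Int) hfg)
      (PySem.Dict.foldl_insert_getD_add_one_eq_counter songs)
  have hvals : (PySem.Dict.counter songs).values
      = (PySem.Set.ofList songs).map (fun k => (songs.count k : Int)) := by
    simp only [PySem.Dict.values, PySem.Dict.items_counter, List.map_map]
    rfl
  have hsorted : (PySem.List.sorted songs (fun s => s) false).Pairwise (· ≤ ·) := by
    simpa using PySem.List.sorted_pairwise songs (fun s => s)
  have hperm : (PySem.List.sorted songs (fun s => s) false).Perm songs :=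
    PySem.List.sorted_perm songs (fun s => s) false
  have hruns : pvRunLengths (PySem.List.sorted songs (fun s => s) false)
      = (pvHeads (PySem.List.sorted songs (fun s => s) false)).map
          (fun k => (songs.count k : Int)) := by
    rw [pvRunLengths_eq _ hsorted]
    apply List.map_congr_left
    intro k _
    rw [hperm.count_eq]
  simp only [hruns]
  rw [hstep, hvals]
  have hbase : (PySem.Set.ofList songs).Perm
      (pvHeads (PySem.List.sorted songs (fun s => s) false)) := by
    rw [List.perm_ext_iff_of_nodup (PySem.Set.nodup_ofList songs)
      (pvHeads_nodup _ hsorted)]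
    intro a
    rw [PySem.Set.mem_ofList, pvHeads_mem _ hsorted, PySem.List.mem_sorted]
  have hmapperm := hbase.map (fun k => (songs.count k : Int))
  rw [pvMax?_perm _ _ hmapperm]
  cases hm : PySem.List.max? ((pvHeads (PySem.List.sorted songs (fun s => s) false)).map
      (fun k => (songs.count k : Int))) (fun v => v) with
  | none => rfl
  | some m =>
      simp only
      rw [pvCountSum, pvCountSum, hmapperm.count_eq]
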